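-- pv_equiv track=rewrite | github.com/advaitrane/DifferentialPrivacyGWAS | statistics/standard_stats.py | get_genotype_dist
-- ===== SOURCE A (Python) =====
-- def get_genotype_dist(genotype_list, phenotype_list):
-- 	genotype_dist = {v:0 for v in [
-- 	'r0', 'r1', 'r2', 'R', 's0', 's1', 's2', 'S', 'n0', 'n1', 'n2', 'N'
-- 	]}
--
-- 	num_subjects = len(genotype_list)
-- 	for subject_idx in range(num_subjects):
-- 		g = genotype_list[subject_idx]
-- 		if g < 0:
-- 			continue
-- 		p = phenotype_list[subject_idx]
--
-- 		p2d_map = {1:'s', 2:'r'}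
-- 		genotype_dist[p2d_map[p]+(str)(g)] += 1
-- 		genotype_dist[p2d_map[p].upper()] += 1
-- 		genotype_dist['n'+(str)(g)] += 1
-- 		genotype_dist['N'] += 1
--
-- 	return genotype_dist
-- ===== SOURCE B (Python) =====
-- def get_genotype_dist(genotype_list, phenotype_list):
-- 	p2d_map = {1:'s', 2:'r'}
-- 	# pass 1: one (disease-letter, genotype) pair per subject with nonnegative genotype
-- 	pairs = [(p2d_map[phenotype_list[i]], genotype_list[i])
-- 		for i in range(len(genotype_list)) if genotype_list[i] >= 0]
-- 	# pass 2: compute every dictionary entry independently by counting pairs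
-- 	genotype_dist = {}
-- 	for c in ['r', 's', 'n']:
-- 		total = 0
-- 		for g in [0, 1, 2]:
-- 			k = sum(1 for q in pairs if (c == 'n' or q[0] == c) and q[1] == g)
-- 			genotype_dist[c + str(g)] = k
-- 			total += k
-- 		genotype_dist[c.upper()] = total
-- 	return genotype_dist
-- ===== Notes on version B (the rewrite author's own statement) =====
-- stated objective: alternative
-- what changed: A makes one pass over subjects incrementing four dictionary buckets per subject; B first builds the list of (disease-letter, genotype) pairs for subjects with nonnegative genotype and then computes each of the 12 dictionary entries independently as a count over that pair list (the capital-letter totals as running sums of the three counts).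
import Mathlib
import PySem

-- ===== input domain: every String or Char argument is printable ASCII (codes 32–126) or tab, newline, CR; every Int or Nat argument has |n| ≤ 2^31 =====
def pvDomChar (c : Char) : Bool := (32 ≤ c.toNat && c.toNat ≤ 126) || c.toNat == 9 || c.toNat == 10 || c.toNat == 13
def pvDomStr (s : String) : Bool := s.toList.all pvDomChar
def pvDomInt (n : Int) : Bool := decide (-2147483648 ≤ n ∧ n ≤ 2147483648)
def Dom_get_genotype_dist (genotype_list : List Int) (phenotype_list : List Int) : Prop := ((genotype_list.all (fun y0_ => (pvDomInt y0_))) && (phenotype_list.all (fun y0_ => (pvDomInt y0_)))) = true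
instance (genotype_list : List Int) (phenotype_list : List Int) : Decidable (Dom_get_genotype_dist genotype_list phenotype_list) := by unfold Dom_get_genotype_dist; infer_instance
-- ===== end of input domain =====

-- B replaces A's per-subject four-bucket increments by building the (disease-letter, genotype)
-- pair list once and computing each of the 12 dictionary entries independently by counting;
-- objective: alternative.

-- ===== PORT A =====
-- the 12-key zero dict comprehension that opens A
def gdInit : PySem.Dict String Int :=
  (["r0", "r1", "r2", "R", "s0", "s1", "s2", "S", "n0", "n1", "n2", "N"]).foldl
    (fun d v => d.insert v 0) ⟨[]⟩

-- the four 'genotype_dist[…] += 1' lines of A's loop body; Dict.modify with default 0 coincides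
-- with Python's 'd[k] += 1' whenever the key is present, which Pre_ guarantees
def gdStepA (d : PySem.Dict String Int) (p g : Int) : PySem.Dict String Int :=
  let p2d : PySem.Dict Int String := ⟨[(1, "s"), (2, "r")]⟩
  let d1 := d.modify (p2d.getD p "" ++ PySem.Int.toStr g) 0 (· + 1)
  let d2 := d1.modify (PySem.Str.upper (p2d.getD p "")) 0 (· + 1)
  let d3 := d2.modify ("n" ++ PySem.Int.toStr g) 0 (· + 1)
  d3.modify "N" 0 (· + 1)

-- A: one pass over the subjects, bumping the four buckets per subject.
-- (phenotype_list[subject_idx] is read with default 0: Pre_ puts the index in range exactly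
-- where Python performs that read.)
def get_genotype_dist (genotype_list : List Int) (phenotype_list : List Int) : List (String × Int) :=
  ((PySem.List.pyRange 0 (genotype_list.length : Int) 1).foldl
    (fun d i =>
      let g := PySem.List.pyGetD genotype_list i 0
      if g < 0 then d
      else gdStepA d (PySem.List.pyGetD phenotype_list i 0) g)
    gdInit).items

-- ===== PORT B =====
-- B's pass 1: the pair-list comprehension (p2d_map[phenotype_list[i]], genotype_list[i])
def gdPairs (genotype_list : List Int) (phenotype_list : List Int) : List (String × Int) :=
  (PySem.List.pyRange 0 (genotype_list.length : Int) 1).filterMap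
    (fun i =>
      if 0 ≤ PySem.List.pyGetD genotype_list i 0 then
        some ((⟨[(1, "s"), (2, "r")]⟩ : PySem.Dict Int String).getD
                (PySem.List.pyGetD phenotype_list i 0) "",
              PySem.List.pyGetD genotype_list i 0)
      else none)

-- B: pass 2 writes every entry of the result directly, as a count over the pair list
-- ('sum(1 for q in pairs if …)' is List.countP); the inner loop over [0,1,2] also accumulates
-- the letter's total, written as the fourth key.
def get_genotype_dist_alt (genotype_list : List Int) (phenotype_list : List Int) : List (String × Int) :=
  let pairs := gdPairs genotype_list phenotype_list
  ((["r", "s", "n"]).foldl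
    (fun d c =>
      let st := ([0, 1, 2] : List Int).foldl
        (fun (st : PySem.Dict String Int × Int) g =>
          let k : Int := pairs.countP (fun q => (c == "n" || q.1 == c) && q.2 == g)
          (st.1.insert (c ++ PySem.Int.toStr g) k, st.2 + k))
        (d, 0)
      st.1.insert (PySem.Str.upper c) st.2)
    (⟨[]⟩ : PySem.Dict String Int)).items

-- ===== PRECONDITION & SPEC =====
-- Pre_ is exactly where Python A returns: every subject with nonnegative genotype must have an
-- in-range phenotype entry, genotype in {0,1,2} and phenotype in {1,2} (else IndexError/KeyError).
def Pre_get_genotype_dist (genotype_list : List Int) (phenotype_list : List Int) : Prop :=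
  ∀ i ∈ List.range genotype_list.length, 0 ≤ genotype_list.getD i 0 →
    (i < phenotype_list.length ∧ genotype_list.getD i 0 ≤ 2 ∧
      (phenotype_list.getD i 0 = 1 ∨ phenotype_list.getD i 0 = 2))
instance (genotype_list : List Int) (phenotype_list : List Int) : Decidable (Pre_get_genotype_dist genotype_list phenotype_list) := by unfold Pre_get_genotype_dist; infer_instance

def pvWitness_get_genotype_dist : List Int × List Int := ([0, 1, -1, 2, 0], [1, 2, 0, 1, 2])

def Spec_get_genotype_dist (genotype_list : List Int) (phenotype_list : List Int) (out : List (String × Int)) : Prop := out = get_genotype_dist_alt genotype_list phenotype_list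
instance (genotype_list : List Int) (phenotype_list : List Int) (out : List (String × Int)) : Decidable (Spec_get_genotype_dist genotype_list phenotype_list out) := by unfold Spec_get_genotype_dist; infer_instance

-- ===== CLAIM (what is proved, stated in full; the proofs are below) =====
def Claim_equal_get_genotype_dist : Prop := ∀ (genotype_list : List Int) (phenotype_list : List Int), Dom_get_genotype_dist genotype_list phenotype_list → Pre_get_genotype_dist genotype_list phenotype_list → Spec_get_genotype_dist genotype_list phenotype_list (get_genotype_dist genotype_list phenotype_list)

-- ===== LEMMAS AND PROOFS =====

-- the events A processes: (phenotype, genotype) of each subject with nonnegative genotype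
def gdEvents (gl pl : List Int) : List (Int × Int) :=
  (List.range gl.length).filterMap (fun i =>
    if 0 ≤ gl.getD i 0 then some (pl.getD i 0, gl.getD i 0) else none)

def gdOK (e : Int × Int) : Prop :=
  (e.1 = 1 ∨ e.1 = 2) ∧ (e.2 = 0 ∨ e.2 = 1 ∨ e.2 = 2)

-- B's pair of an event
def gdPairOf (e : Int × Int) : String × Int :=
  ((⟨[(1, "s"), (2, "r")]⟩ : PySem.Dict Int String).getD e.1 "", e.2)

-- the 12-key dict with a symbolic value per key
def gdTab (f : String → Int) : PySem.Dict String Int :=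
  ⟨[("r0", f "r0"), ("r1", f "r1"), ("r2", f "r2"), ("R", f "R"),
    ("s0", f "s0"), ("s1", f "s1"), ("s2", f "s2"), ("S", f "S"),
    ("n0", f "n0"), ("n1", f "n1"), ("n2", f "n2"), ("N", f "N")]⟩

-- how much one event (p, g) contributes to key k (valid for p ∈ {1, 2})
def gdW (k : String) (e : Int × Int) : Int :=
  (if k = (if e.1 = 1 then "s" else "r") ++ PySem.Int.toStr e.2 then 1 else 0) +
  (if k = (if e.1 = 1 then "S" else "R") then 1 else 0) +
  (if k = "n" ++ PySem.Int.toStr e.2 then 1 else 0) +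
  (if k = "N" then 1 else 0)

lemma gdInit_eq : gdInit = gdTab (fun _ => 0) := by decide

set_option maxHeartbeats 1000000 in
lemma gdStepA_tab (f : String → Int) (p g : Int) (hp : p = 1 ∨ p = 2)
    (hg : g = 0 ∨ g = 1 ∨ g = 2) :
    gdStepA (gdTab f) p g = gdTab (fun k => f k + gdW k (p, g)) := by
  rcases hp with rfl | rfl <;> rcases hg with rfl | rfl | rfl <;>
    simp [gdStepA, gdTab, gdW, PySem.Dict.modify, PySem.Dict.insert, PySem.Dict.contains,
      PySem.Dict.getD, PySem.Dict.get?, List.find?,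
      show PySem.Int.toStr 0 = "0" from rfl, show PySem.Int.toStr 1 = "1" from rfl,
      show PySem.Int.toStr 2 = "2" from rfl,
      show PySem.Str.upper "s" = "S" from by decide, show PySem.Str.upper "r" = "R" from by decide]

lemma foldA_tab (es : List (Int × Int)) (f : String → Int) (h : ∀ e ∈ es, gdOK e) :
    es.foldl (fun d e => gdStepA d e.1 e.2) (gdTab f)
      = gdTab (fun k => f k + (es.map (gdW k)).sum) := by
  induction es generalizing f with
  | nil => simp
  | cons e t ih =>
    have he := h e (by simp)
    simp only [List.foldl_cons]
    rw [gdStepA_tab f e.1 e.2 he.1 he.2, ih _ (fun x hx => h x (by simp [hx]))]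
    congr 1; funext k; simp; ring

-- A's index loop is the event fold
lemma portA_events (gl pl : List Int) :
    get_genotype_dist gl pl
      = ((gdEvents gl pl).foldl (fun d e => gdStepA d e.1 e.2) gdInit).items := by
  unfold get_genotype_dist gdEvents
  rw [PySem.List.pyRange_zero_nat, List.foldl_map, List.foldl_filterMap]
  congr 1
  apply PySem.List.foldl_congr_mem _ _ _ _
  intro d i _
  dsimp only
  simp only [PySem.List.pyGetD_natCast]
  by_cases h : 0 ≤ gl.getD i 0
  · rw [if_neg (by omega), if_pos h]
  · rw [if_pos (by omega), if_neg h]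

-- B's pair list is the event list mapped through gdPairOf
lemma pairs_events (gl pl : List Int) :
    gdPairs gl pl = (gdEvents gl pl).map gdPairOf := by
  unfold gdPairs gdEvents
  rw [PySem.List.pyRange_zero_nat, List.filterMap_map, List.map_filterMap]
  apply List.filterMap_congr
  intro i _
  simp only [Function.comp, PySem.List.pyGetD_natCast]
  by_cases h : 0 ≤ gl.getD i 0
  · rw [if_pos h, if_pos h]; rfl
  · rw [if_neg h, if_neg h]; rfl

-- sum of per-event weights at key k = count over the mapped pairs, given the pointwise rule
lemma sum_gdW_eq_countP (k : String) (pr : String × Int → Bool)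
    (h1 : ∀ e, gdOK e → gdW k e = if pr (gdPairOf e) then 1 else 0) :
    ∀ es : List (Int × Int), (∀ e ∈ es, gdOK e) →
      (es.map (gdW k)).sum = ((es.map gdPairOf).countP pr : Int) := by
  intro es
  induction es with
  | nil => simp
  | cons e t ih =>
    intro h
    have he := h e (by simp)
    have ht := ih (fun x hx => h x (by simp [hx]))
    simp only [List.map_cons, List.sum_cons, List.countP_cons, h1 e he, ht]
    by_cases hpr : pr (gdPairOf e) = true <;> simp [hpr] <;> ring

-- every pair of an ok event has genotype 0, 1 or 2, so the three per-genotype counts of a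
-- letter sum to the letter's total count
lemma countP_split3 (pr : String × Int → Bool) :
    ∀ ps : List (String × Int), (∀ q ∈ ps, q.2 = 0 ∨ q.2 = 1 ∨ q.2 = 2) →
      (ps.countP (fun q => pr q && q.2 == (0 : Int)) : Int)
        + (ps.countP (fun q => pr q && q.2 == (1 : Int)) : Int)
        + (ps.countP (fun q => pr q && q.2 == (2 : Int)) : Int)
      = (ps.countP pr : Int) := by
  intro ps
  induction ps with
  | nil => simp
  | cons q t ih =>
    intro h
    have hq := h q (by simp)
    have ht := ih (fun x hx => h x (by simp [hx]))
    simp only [List.countP_cons]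
    by_cases hpr : pr q = true
    · rcases hq with h2 | h2 | h2 <;> (simp [hpr, h2]; omega)
    · simp [hpr]; omega

lemma events_ok (gl pl : List Int) (hpre : Pre_get_genotype_dist gl pl) :
    ∀ e ∈ gdEvents gl pl, gdOK e := by
  intro e he
  rcases List.mem_filterMap.mp he with ⟨i, hi, hsome⟩
  by_cases h : 0 ≤ gl.getD i 0
  · rw [if_pos h] at hsome
    rcases hpre i hi h with ⟨_, hg2, hp⟩
    cases hsome
    exact ⟨hp, by omega⟩
  · rw [if_neg h] at hsome; cases hsome

lemma pairs_ok (es : List (Int × Int)) (h : ∀ e ∈ es, gdOK e) :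
    ∀ q ∈ es.map gdPairOf, q.2 = 0 ∨ q.2 = 1 ∨ q.2 = 2 := by
  intro q hq
  rcases List.mem_map.mp hq with ⟨e, he, rfl⟩
  exact (h e he).2

lemma gd_equal (gl pl : List Int) (hpre : Pre_get_genotype_dist gl pl) :
    get_genotype_dist gl pl = get_genotype_dist_alt gl pl := by
  have hok := events_ok gl pl hpre
  rw [portA_events, gdInit_eq, foldA_tab _ _ hok]
  show _ = get_genotype_dist_alt gl pl
  unfold get_genotype_dist_alt
  rw [pairs_events]
  set es := gdEvents gl pl with hes
  have hps := pairs_ok es hok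
  -- evaluate B's two literal loops: the result is an explicit 12-entry dict of counts
  show (gdTab _).items = _
  simp only [List.foldl_cons, List.foldl_nil]
  have hptw : ∀ (k : String) (pr : String × Int → Bool),
      (∀ p ∈ ([1, 2] : List Int), ∀ g ∈ ([0, 1, 2] : List Int),
        gdW k (p, g) = if pr (gdPairOf (p, g)) then 1 else 0) →
      ∀ e, gdOK e → gdW k e = if pr (gdPairOf e) then 1 else 0 := by
    rintro k pr h ⟨p, g⟩ ⟨hp, hg⟩
    simp only at hp hg
    exact h p (by rcases hp with h | h <;> simp [h]) g (by rcases hg with h | h | h <;> simp [h])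
  have hr0 := sum_gdW_eq_countP "r0" (fun q => ("r" == "n" || q.1 == "r") && q.2 == (0 : Int)) (hptw "r0" (fun q => ("r" == "n" || q.1 == "r") && q.2 == (0 : Int)) (by decide)) es hok
  have hr1 := sum_gdW_eq_countP "r1" (fun q => ("r" == "n" || q.1 == "r") && q.2 == (1 : Int)) (hptw "r1" (fun q => ("r" == "n" || q.1 == "r") && q.2 == (1 : Int)) (by decide)) es hok
  have hr2 := sum_gdW_eq_countP "r2" (fun q => ("r" == "n" || q.1 == "r") && q.2 == (2 : Int)) (hptw "r2" (fun q => ("r" == "n" || q.1 == "r") && q.2 == (2 : Int)) (by decide)) es hok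
  have hs0 := sum_gdW_eq_countP "s0" (fun q => ("s" == "n" || q.1 == "s") && q.2 == (0 : Int)) (hptw "s0" (fun q => ("s" == "n" || q.1 == "s") && q.2 == (0 : Int)) (by decide)) es hok
  have hs1 := sum_gdW_eq_countP "s1" (fun q => ("s" == "n" || q.1 == "s") && q.2 == (1 : Int)) (hptw "s1" (fun q => ("s" == "n" || q.1 == "s") && q.2 == (1 : Int)) (by decide)) es hok
  have hs2 := sum_gdW_eq_countP "s2" (fun q => ("s" == "n" || q.1 == "s") && q.2 == (2 : Int)) (hptw "s2" (fun q => ("s" == "n" || q.1 == "s") && q.2 == (2 : Int)) (by decide)) es hok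
  have hn0 := sum_gdW_eq_countP "n0" (fun q => ("n" == "n" || q.1 == "n") && q.2 == (0 : Int)) (hptw "n0" (fun q => ("n" == "n" || q.1 == "n") && q.2 == (0 : Int)) (by decide)) es hok
  have hn1 := sum_gdW_eq_countP "n1" (fun q => ("n" == "n" || q.1 == "n") && q.2 == (1 : Int)) (hptw "n1" (fun q => ("n" == "n" || q.1 == "n") && q.2 == (1 : Int)) (by decide)) es hok
  have hn2 := sum_gdW_eq_countP "n2" (fun q => ("n" == "n" || q.1 == "n") && q.2 == (2 : Int)) (hptw "n2" (fun q => ("n" == "n" || q.1 == "n") && q.2 == (2 : Int)) (by decide)) es hok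
  have hR := (sum_gdW_eq_countP "R" (fun q => "r" == "n" || q.1 == "r") (hptw "R" (fun q => "r" == "n" || q.1 == "r") (by decide)) es hok).trans
    (countP_split3 (fun q => "r" == "n" || q.1 == "r") (es.map gdPairOf) hps).symm
  have hS := (sum_gdW_eq_countP "S" (fun q => "s" == "n" || q.1 == "s") (hptw "S" (fun q => "s" == "n" || q.1 == "s") (by decide)) es hok).trans
    (countP_split3 (fun q => "s" == "n" || q.1 == "s") (es.map gdPairOf) hps).symm
  have hN := (sum_gdW_eq_countP "N" (fun q => "n" == "n" || q.1 == "n") (hptw "N" (fun q => "n" == "n" || q.1 == "n") (by decide)) es hok).trans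
    (countP_split3 (fun q => "n" == "n" || q.1 == "n") (es.map gdPairOf) hps).symm
  simp only [zero_add] at *
  simp [gdTab, PySem.Dict.insert, PySem.Dict.contains,
    hr0, hr1, hr2, hs0, hs1, hs2, hn0, hn1, hn2, hR, hS, hN,
    show PySem.Int.toStr 0 = "0" from rfl, show PySem.Int.toStr 1 = "1" from rfl,
    show PySem.Int.toStr 2 = "2" from rfl,
    show PySem.Str.upper "r" = "R" from by decide, show PySem.Str.upper "s" = "S" from by decide,
    show PySem.Str.upper "n" = "N" from by decide]

-- ===== VERDICT (by name: the statement is the Claim_ definition above) =====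
theorem get_genotype_dist_spec : Claim_equal_get_genotype_dist := by
  intro gl pl _ hpre
  unfold Spec_get_genotype_dist
  exact gd_equal gl pl hpre
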